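-- pv_equiv track=rewrite | github.com/tsilva/.github | src/gitguard/rules/gitignore.py | _parse_managed_rules
-- ===== SOURCE A (Python) =====
-- _MANAGED_HEADER = "# Managed by tsilva/.github"
--
-- def _parse_managed_rules(content: str) -> list[str]:
--     """Extract non-comment, non-blank rules from managed block(s)."""
--     rules = []
--     in_managed = False
--     for line in content.splitlines():
--         if line.strip() == _MANAGED_HEADER:
--             in_managed = True
--             continue
--         if not in_managed:
--             continue
--         stripped = line.strip()
--         if not stripped or stripped.startswith("#"):
--             continue
--         rules.append(stripped)
--     return rules
-- ===== SOURCE B (Python) =====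
-- _MANAGED_HEADER = "# Managed by tsilva/.github"
--
--
-- def _parse_managed_rules(content: str) -> list[str]:
--     """Extract non-comment, non-blank rules from managed block(s)."""
--     lines = content.splitlines()
--     start = None
--     for i, line in enumerate(lines):
--         if line.strip() == _MANAGED_HEADER:
--             start = i + 1
--             break
--     if start is None:
--         return []
--     stripped = [line.strip() for line in lines[start:]]
--     return [s for s in stripped if s and not s.startswith("#")]
-- ===== Notes on version B (the rewrite author's own statement) =====
-- stated objective: simpler
-- what changed: Replaces the flag-driven single loop (in_managed never resets once set) by two separate passes: locate the index of the first header line, then strip-and-filter the lines after it with comprehensions.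
import Mathlib
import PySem

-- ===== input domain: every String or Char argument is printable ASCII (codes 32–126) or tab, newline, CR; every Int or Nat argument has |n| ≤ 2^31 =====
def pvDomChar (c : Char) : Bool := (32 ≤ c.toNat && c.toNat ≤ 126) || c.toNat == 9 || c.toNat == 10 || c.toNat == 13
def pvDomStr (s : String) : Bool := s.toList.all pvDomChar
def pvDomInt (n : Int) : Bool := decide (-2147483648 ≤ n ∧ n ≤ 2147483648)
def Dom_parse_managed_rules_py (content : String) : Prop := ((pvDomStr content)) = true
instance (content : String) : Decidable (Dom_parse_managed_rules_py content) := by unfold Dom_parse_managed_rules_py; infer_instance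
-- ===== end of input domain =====

-- B finds the first managed-header line's index, then strips and filters the lines after it
-- (two simple passes instead of A's flag-driven loop); objective: simpler.


def pvHeader : String := "# Managed by tsilva/.github"

-- ===== PORT A =====
def parse_managed_rules_py (content : String) : List String :=
  ((PySem.Str.splitlines content).foldl
    (fun (st : List String × Bool) line =>
      if PySem.Str.strip line == pvHeader then (st.1, true)
      else if !st.2 then st
      else
        let stripped := PySem.Str.strip line
        if stripped == "" || PySem.Str.startswith stripped "#" then st
        else (st.1 ++ [stripped], st.2))
    ([], false)).1

-- ===== PORT B =====
-- the enumerate-and-break loop of Source B: first index whose strip equals the header, plus one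
def pvFindStart : List String → Nat → Option Nat
  | [], _ => none
  | l :: ls, i => if PySem.Str.strip l == pvHeader then some (i + 1) else pvFindStart ls (i + 1)

def parse_managed_rules_py_alt (content : String) : List String :=
  let lines := PySem.Str.splitlines content
  match pvFindStart lines 0 with
  | none => []
  | some start =>
    ((PySem.List.slice lines (some (start : Int)) none).map PySem.Str.strip).filter
      (fun s => !(s == "") && !PySem.Str.startswith s "#")

-- ===== PRECONDITION & SPEC =====
def Spec_parse_managed_rules_py (content : String) (out : List String) : Prop := out = parse_managed_rules_py_alt content
instance (content : String) (out : List String) : Decidable (Spec_parse_managed_rules_py content out) := by unfold Spec_parse_managed_rules_py; infer_instance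

-- ===== CLAIM (what is proved, stated in full; the proofs are below) =====
def Claim_equal_parse_managed_rules_py : Prop := ∀ (content : String), Dom_parse_managed_rules_py content → Spec_parse_managed_rules_py content (parse_managed_rules_py content)

-- ===== LEMMAS AND PROOFS =====

def pvStep : List String × Bool → String → List String × Bool :=
  fun st line =>
    if PySem.Str.strip line == pvHeader then (st.1, true)
    else if !st.2 then st
    else
      let stripped := PySem.Str.strip line
      if stripped == "" || PySem.Str.startswith stripped "#" then st
      else (st.1 ++ [stripped], st.2)

def pvKeep (s : String) : Bool := !(s == "") && !PySem.Str.startswith s "#"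

lemma pvHeader_startswith : PySem.Str.startswith pvHeader "#" = true := by decide

lemma pvKeep_header (s : String) (h : (PySem.Str.strip s == pvHeader) = true) :
    pvKeep (PySem.Str.strip s) = false := by
  simp only [pvKeep, eq_of_beq h, pvHeader_startswith]
  decide

lemma loop_true (l : List String) (acc : List String) :
    (l.foldl pvStep (acc, true)).1 = acc ++ (l.map PySem.Str.strip).filter pvKeep := by
  induction l generalizing acc with
  | nil => simp
  | cons h t ih =>
    rw [List.foldl_cons, List.map_cons, List.filter_cons]
    by_cases hh : (PySem.Str.strip h == pvHeader) = true
    · rw [pvKeep_header h hh]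
      simp only [pvStep, hh, if_true]
      simpa using ih acc
    · simp only [pvStep, hh, if_false, Bool.not_true, Bool.false_eq_true, if_false]
      by_cases hk : (PySem.Str.strip h == "" || PySem.Str.startswith (PySem.Str.strip h) "#") = true
      · have hkeep : pvKeep (PySem.Str.strip h) = false := by
          rcases Bool.or_eq_true_iff.mp hk with h1 | h1
          · simp [pvKeep, eq_of_beq h1]
          · simp at h1
            simp [pvKeep, h1]
        rw [hkeep]
        simp only [hk, if_true]
        simpa using ih acc
      · have hkeep : pvKeep (PySem.Str.strip h) = true := by
          have h2 := Bool.or_eq_false_iff.mp (Bool.eq_false_iff.mpr hk)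
          have h3 := h2.2
          simp at h3
          simp [pvKeep, h2.1, h3]
        rw [hkeep]
        simp only [hk, Bool.false_eq_true, if_false, if_true]
        rw [ih (acc ++ [PySem.Str.strip h])]
        simp

lemma find_shift (l : List String) (i : Nat) :
    pvFindStart l i = (pvFindStart l 0).map (· + i) := by
  induction l generalizing i with
  | nil => simp [pvFindStart]
  | cons h t ih =>
    simp only [pvFindStart]
    by_cases hh : PySem.Str.strip h == pvHeader
    · simp [hh, Nat.add_comm]
    · rw [if_neg hh, if_neg hh, ih (i + 1), ih 1]
      cases pvFindStart t 0
      · simp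
      · simp
        omega

lemma loop_false (l : List String) :
    (l.foldl pvStep ([], false)).1 =
      match pvFindStart l 0 with
      | none => []
      | some start => ((l.drop start).map PySem.Str.strip).filter pvKeep := by
  induction l with
  | nil => simp [pvFindStart]
  | cons h t ih =>
    rw [List.foldl_cons]
    by_cases hh : (PySem.Str.strip h == pvHeader) = true
    · simp only [pvStep, pvFindStart, hh, if_true]
      simpa using loop_true t []
    · simp only [pvStep, pvFindStart, hh, if_false, Bool.false_eq_true, Bool.not_false, if_true]
      rw [ih, find_shift t 1]
      cases pvFindStart t 0 with
      | none => simp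
      | some s => simp [List.drop_succ_cons]

lemma slice_nat (l : List String) (n : Nat) :
    PySem.List.slice l (some (n : Int)) none = l.drop n := by
  simp [PySem.List.slice_from]

-- ===== VERDICT (by name: the statement is the Claim_ definition above) =====
theorem parse_managed_rules_py_spec : Claim_equal_parse_managed_rules_py := by
  intro content _
  unfold Spec_parse_managed_rules_py parse_managed_rules_py parse_managed_rules_py_alt
  rw [show (fun (st : List String × Bool) line =>
      if PySem.Str.strip line == pvHeader then (st.1, true)
      else if !st.2 then st
      else
        let stripped := PySem.Str.strip line
        if stripped == "" || PySem.Str.startswith stripped "#" then st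
        else (st.1 ++ [stripped], st.2)) = pvStep from rfl]
  rw [loop_false]
  cases hf : pvFindStart (PySem.Str.splitlines content) 0 with
  | none => simp only [hf]
  | some s =>
    simp only [hf, slice_nat]
    apply List.filter_congr
    intro x _
    simp [pvKeep]
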